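-- pv_equiv track=rewrite | github.com/racampos/agentic-ai-unleashed | orchestrator/error_detection/base.py | extract_word_at_marker
-- ===== SOURCE A (Python) =====
-- from typing import Dict, List, Optional, Any, Tuple
--
-- def extract_word_at_marker(command: str, output: str) -> Optional[Tuple[str, int]]:
--     """
--     Extract the word that the ^ marker is pointing to in Cisco error output.
--
--     Args:
--         command: The CLI command that was executed
--         output: The router's error output containing the ^ marker
--
--     Returns:
--         Tuple of (word, word_index) if found, None otherwise
--
--     Example:
--         >>> command = "hostnane S1"
--         >>> output = "Switch(config)#hostnane S1\\n                     ^\\n% Invalid input..."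
--         >>> extract_word_at_marker(command, output)
--         ('hostnane', 0)
--     """
--     if "^" not in output:
--         return None
--
--     # Find the line with the ^ marker
--     lines = output.split('\n')
--     marker_line_idx = -1
--     for i, line in enumerate(lines):
--         if '^' in line:
--             marker_line_idx = i
--             break
--
--     if marker_line_idx < 0 or marker_line_idx == 0:
--         return None
--
--     # Get the command line (right before the marker)
--     command_line = lines[marker_line_idx - 1]
--     marker_line = lines[marker_line_idx]
--
--     # Find the position of the ^ marker
--     marker_position = marker_line.index('^')
--
--     # Extract just the command part (after the prompt)
--     # Cisco prompts end with # or >, find the last one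
--     prompt_end = max(command_line.rfind('#'), command_line.rfind('>'))
--     if prompt_end < 0:
--         # No prompt found, use the whole line
--         command_part = command_line
--         offset = 0
--     else:
--         command_part = command_line[prompt_end + 1:]
--         offset = prompt_end + 1
--
--     # Adjust marker position relative to command start
--     adjusted_marker = marker_position - offset
--
--     if adjusted_marker < 0 or adjusted_marker >= len(command_part):
--         return None
--
--     # Split command into words and find which word the marker points to
--     words = command_part.split()
--     current_pos = 0
--
--     for word_idx, word in enumerate(words):
--         word_start = command_part.find(word, current_pos)
--         word_end = word_start + len(word)
--
--         # Check if marker is within this word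
--         if word_start <= adjusted_marker < word_end:
--             return (word, word_idx)
--
--         current_pos = word_end
--
--     # Marker might be pointing to whitespace or end, return last word
--     if words:
--         return (words[-1], len(words) - 1)
--
--     return None
-- ===== SOURCE B (Python) =====
-- # B: same guard logic, but a unified offset (offset is always prompt_end+1) and a
-- # one-scan span table of word (start,end) positions with a single containing-span
-- # lookup (falling back to the last span), instead of split() plus repeated .find().
-- def extract_word_at_marker(command, output):
--     if "^" not in output:
--         return None
--
--     lines = output.split('\n')
--     marker_line_idx = None
--     for i, line in enumerate(lines):
--         if '^' in line:
--             marker_line_idx = i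
--             break
--     if not marker_line_idx:  # no marker line, or marker on the first line
--         return None
--
--     command_line = lines[marker_line_idx - 1]
--     marker_position = lines[marker_line_idx].index('^')
--
--     # rfind returns -1 when absent, so prompt_end + 1 is the offset in every case
--     prompt_end = max(command_line.rfind('#'), command_line.rfind('>'))
--     command_part = command_line[prompt_end + 1:]
--     adjusted_marker = marker_position - (prompt_end + 1)
--
--     if not (0 <= adjusted_marker < len(command_part)):
--         return None
--
--     # one scan: (start, end) spans of the whitespace-separated words
--     spans = []
--     start = None
--     for i, ch in enumerate(command_part):
--         if ch.isspace():
--             if start is not None: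
--                 spans.append((start, i))
--             start = None
--         elif start is None:
--             start = i
--     if start is not None:
--         spans.append((start, len(command_part)))
--
--     # single lookup: the span containing the marker, else the last span
--     hit = None
--     for j, (s, e) in enumerate(spans):
--         if s <= adjusted_marker < e:
--             hit = (s, e, j)
--             break
--     if hit is None:
--         if not spans:
--             return None
--         s, e = spans[-1]
--         hit = (s, e, len(spans) - 1)
--     s, e, j = hit
--     return (command_part[s:e], j)
-- ===== Notes on version B (the rewrite author's own statement) =====
-- stated objective: alternative
-- what changed: B keeps A's guard logic but folds the prompt offset into the single expression prompt_end+1 (valid because rfind returns -1 when no prompt is found) and replaces split() plus a loop of repeated substring .find calls with one character scan that builds a (start,end) span table of the words followed by a single containing-span lookup with a last-span fallback.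
import Mathlib
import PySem

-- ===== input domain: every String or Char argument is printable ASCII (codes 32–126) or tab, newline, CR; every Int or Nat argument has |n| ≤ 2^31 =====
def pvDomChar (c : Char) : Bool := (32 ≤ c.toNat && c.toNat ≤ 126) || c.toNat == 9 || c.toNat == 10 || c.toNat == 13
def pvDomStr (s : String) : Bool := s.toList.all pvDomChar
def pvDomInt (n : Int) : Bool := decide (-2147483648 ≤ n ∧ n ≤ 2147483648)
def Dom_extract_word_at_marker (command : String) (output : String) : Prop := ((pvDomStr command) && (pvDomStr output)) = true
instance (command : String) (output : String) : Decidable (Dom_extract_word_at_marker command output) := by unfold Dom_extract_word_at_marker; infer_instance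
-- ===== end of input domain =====

-- B keeps A's guard logic but uses a unified offset (always prompt_end+1) and locates the
-- word by one span-table scan plus a single containing-span lookup, instead of split()
-- followed by repeated substring .find calls (objective: alternative decomposition).

-- ===== PORT A =====

-- the 'for i, line in enumerate(lines): if '^' in line: marker_line_idx = i; break' loop
def markerLoopA : List (List Char) → Int → Int
  | [], _ => -1
  | l :: ls, i => if PySem.Chars.isIn ['^'] l then i else markerLoopA ls (i + 1)

-- the 'for word_idx, word in enumerate(words): …' loop with its current_pos accumulator
def wordLoopA (cp : List Char) (adjusted : Int) :
    List (List Char) → Nat → Int → Option (List Char × Nat)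
  | [], _, _ => none
  | w :: ws, idx, pos =>
    let wStart := PySem.Chars.findFrom cp w pos
    let wEnd := wStart + w.length
    if wStart ≤ adjusted ∧ adjusted < wEnd then some (w, idx)
    else wordLoopA cp adjusted ws (idx + 1) wEnd

def extract_word_at_marker (command : String) (output : String) : Option (String × Int) :=
  let out := output.toList
  if PySem.Chars.isIn ['^'] out = false then none else
  let lines := PySem.Chars.splitOn out ['\n']
  let markerLineIdx := markerLoopA lines 0
  if markerLineIdx < 0 ∨ markerLineIdx = 0 then none else
  -- both indices are provably in range here, so pyGetD stands for the raise-free lines[i]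
  let commandLine := PySem.List.pyGetD lines (markerLineIdx - 1) []
  let markerLine := PySem.List.pyGetD lines markerLineIdx []
  -- '^' is in marker_line whenever this point is reached, so .index '^' = find '^' (no raise)
  let markerPosition := PySem.Chars.find markerLine ['^']
  let promptEnd := max (PySem.Chars.rfind commandLine ['#']) (PySem.Chars.rfind commandLine ['>'])
  let cpOff : List Char × Int :=
    if promptEnd < 0 then (commandLine, 0)
    else (PySem.Chars.slice commandLine (some (promptEnd + 1)) none, promptEnd + 1)
  let commandPart := cpOff.1
  let adjustedMarker := markerPosition - cpOff.2
  if adjustedMarker < 0 ∨ (commandPart.length : Int) ≤ adjustedMarker then none else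
  let words := PySem.Chars.split₀ commandPart
  match wordLoopA commandPart adjustedMarker words 0 0 with
  | some (w, i) => some (String.ofList w, (i : Int))
  | none =>
    match words.getLast? with
    | some w => some (String.ofList w, (words.length : Int) - 1)
    | none => none

-- ===== PORT B =====

-- first line containing '^', if any
def markerLoopB : List (List Char) → Nat → Option Nat
  | [], _ => none
  | l :: ls, i => if PySem.Chars.isIn ['^'] l then some i else markerLoopB ls (i + 1)

-- one scan over command_part: (start, end) spans of the whitespace-separated words
def spansGo : List Char → Nat → Option Nat → List (Nat × Nat)
  | [], _, none => []
  | [], i, some s => [(s, i)]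
  | c :: t, i, st =>
    if PySem.Chars.isspace c then
      match st with
      | some s => (s, i) :: spansGo t (i + 1) none
      | none => spansGo t (i + 1) none
    else
      match st with
      | none => spansGo t (i + 1) (some i)
      | some s => spansGo t (i + 1) (some s)

-- single lookup: first span containing the marker, together with its index
def spanFind (m : Nat) : List (Nat × Nat) → Nat → Option ((Nat × Nat) × Nat)
  | [], _ => none
  | se :: t, j => if se.1 ≤ m ∧ m < se.2 then some (se, j) else spanFind m t (j + 1)

def extract_word_at_marker_alt (command : String) (output : String) : Option (String × Int) :=
  let out := output.toList
  if PySem.Chars.isIn ['^'] out = false then none else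
  let lines := PySem.Chars.splitOn out ['\n']
  match markerLoopB lines 0 with
  | none => none
  | some 0 => none
  | some (k + 1) =>
    let commandLine := lines.getD k []
    let markerPosition := PySem.Chars.find (lines.getD (k + 1) []) ['^']
    let promptEnd := max (PySem.Chars.rfind commandLine ['#']) (PySem.Chars.rfind commandLine ['>'])
    let commandPart := PySem.Chars.slice commandLine (some (promptEnd + 1)) none
    let adjustedMarker := markerPosition - (promptEnd + 1)
    if adjustedMarker < 0 ∨ (commandPart.length : Int) ≤ adjustedMarker then none else
    let spans := spansGo commandPart 0 none
    match spanFind adjustedMarker.toNat spans 0 with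
    | some (se, j) =>
      some (String.ofList (PySem.Chars.slice commandPart (some (se.1 : Int)) (some (se.2 : Int))), (j : Int))
    | none =>
      match spans.getLast? with
      | none => none
      | some se =>
        some (String.ofList (PySem.Chars.slice commandPart (some (se.1 : Int)) (some (se.2 : Int))), (spans.length : Int) - 1)

-- ===== PRECONDITION & SPEC =====
def Spec_extract_word_at_marker (command : String) (output : String) (out : Option (String × Int)) : Prop := out = extract_word_at_marker_alt command output
instance (command : String) (output : String) (out : Option (String × Int)) : Decidable (Spec_extract_word_at_marker command output out) := by unfold Spec_extract_word_at_marker; infer_instance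

-- ===== CLAIM (what is proved, stated in full; the proofs are below) =====
def Claim_equal_extract_word_at_marker : Prop := ∀ (command : String) (output : String), Dom_extract_word_at_marker command output → Spec_extract_word_at_marker command output (extract_word_at_marker command output)

-- ===== LEMMAS AND PROOFS =====

theorem markerLoop_eq (ls : List (List Char)) (i : Nat) :
    markerLoopA ls (i : Int) = (markerLoopB ls i).elim (-1) (fun k => (k : Int)) := by
  induction ls generalizing i with
  | nil => rfl
  | cons l t ih =>
    simp only [markerLoopA, markerLoopB]
    split
    · rfl
    · have := ih (i + 1)
      push_cast at this ⊢
      exact this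

theorem neg_one_le_rfind_go (s sub : List Char) : ∀ n, -1 ≤ PySem.Chars.rfind.go s sub n := by
  intro n
  induction n with
  | zero => simp only [PySem.Chars.rfind.go]; split <;> omega
  | succ j ih => simp only [PySem.Chars.rfind.go]; split
                 · omega
                 · exact ih

theorem neg_one_le_rfind (s sub : List Char) : -1 ≤ PySem.Chars.rfind s sub := by
  simp only [PySem.Chars.rfind]; exact neg_one_le_rfind_go s sub s.length

theorem spansGo_space (ws : List Char) (h : ∀ c ∈ ws, PySem.Chars.isspace c = true)
    (l : List Char) (i : Nat) :
    spansGo (ws ++ l) i none = spansGo l (i + ws.length) none := by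
  induction ws generalizing i with
  | nil => simp
  | cons c t ih =>
    have hc := h c (by simp)
    simp only [List.cons_append, spansGo, hc, if_true]
    rw [ih (fun d hd => h d (by simp [hd])) (i + 1)]
    congr 1
    simp; omega

theorem spansGo_word (w : List Char) (h : ∀ c ∈ w, PySem.Chars.isspace c = false)
    (l : List Char) (i s : Nat) :
    spansGo (w ++ l) i (some s) = spansGo l (i + w.length) (some s) := by
  induction w generalizing i with
  | nil => simp
  | cons c t ih =>
    have hc := h c (by simp)
    simp only [List.cons_append, spansGo, hc, if_false, Bool.false_eq_true]
    rw [ih (fun d hd => h d (by simp [hd])) (i + 1)]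
    congr 1
    simp; omega

theorem spansGo_run (ws w rest : List Char)
    (hws : ∀ c ∈ ws, PySem.Chars.isspace c = true) (hw : w ≠ [])
    (hwn : ∀ c ∈ w, PySem.Chars.isspace c = false)
    (hrest : rest = [] ∨ ∃ d r', rest = d :: r' ∧ PySem.Chars.isspace d = true) (i : Nat) :
    spansGo (ws ++ w ++ rest) i none
      = (i + ws.length, i + ws.length + w.length) :: spansGo rest (i + ws.length + w.length) none := by
  rw [List.append_assoc, spansGo_space ws hws]
  obtain ⟨c, w', rfl⟩ := List.exists_cons_of_ne_nil hw
  have hc := hwn c (by simp)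
  simp only [List.cons_append, spansGo, hc, if_false, Bool.false_eq_true]
  rw [spansGo_word w' (fun d hd => hwn d (by simp [hd]))]
  have hlen : i + ws.length + 1 + w'.length = i + ws.length + (c :: w').length := by
    simp; omega
  rcases hrest with rfl | ⟨d, r', rfl, hd⟩
  · simp only [spansGo, hlen]
  · simp only [spansGo, hd, if_true, hlen]

theorem split₀_go_acc (l : List Char) : ∀ (cur : List Char) (acc : List (List Char)),
    PySem.Chars.split₀.go l cur acc = acc.reverse ++ PySem.Chars.split₀.go l cur [] := by
  induction l with
  | nil =>
    intro cur acc
    simp only [PySem.Chars.split₀.go]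
    split <;> simp
  | cons c t ih =>
    intro cur acc
    simp only [PySem.Chars.split₀.go]
    split
    · split
      · rw [ih [] acc]
      · rw [ih [] (cur.reverse :: acc), ih [] [cur.reverse]]
        simp
    · rw [ih (c :: cur) acc]

theorem split₀_go_space (ws : List Char) (h : ∀ c ∈ ws, PySem.Chars.isspace c = true)
    (l : List Char) (acc : List (List Char)) :
    PySem.Chars.split₀.go (ws ++ l) [] acc = PySem.Chars.split₀.go l [] acc := by
  induction ws with
  | nil => simp
  | cons c t ih =>
    have hc := h c (by simp)
    simp only [List.cons_append, PySem.Chars.split₀.go, hc, if_true, List.isEmpty_nil]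
    exact ih (fun d hd => h d (by simp [hd]))

theorem split₀_go_word (w : List Char) (h : ∀ c ∈ w, PySem.Chars.isspace c = false) :
    ∀ (l cur : List Char) (acc : List (List Char)),
    PySem.Chars.split₀.go (w ++ l) cur acc = PySem.Chars.split₀.go l (w.reverse ++ cur) acc := by
  induction w with
  | nil => intro l cur acc; simp
  | cons c t ih =>
    intro l cur acc
    have hc := h c (by simp)
    simp only [List.cons_append, PySem.Chars.split₀.go, hc, if_false, Bool.false_eq_true]
    rw [ih (fun d hd => h d (by simp [hd])) l (c :: cur) acc]
    simp

theorem split₀_all_space (ws : List Char) (h : ∀ c ∈ ws, PySem.Chars.isspace c = true) :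
    PySem.Chars.split₀ ws = [] := by
  have := split₀_go_space ws h [] []
  simp only [List.append_nil] at this
  simp only [PySem.Chars.split₀, this, PySem.Chars.split₀.go, List.isEmpty_nil, if_true,
    List.reverse_nil]

theorem split₀_cons_space (d : Char) (hd : PySem.Chars.isspace d = true) (r : List Char) :
    PySem.Chars.split₀ (d :: r) = PySem.Chars.split₀ r := by
  simp only [PySem.Chars.split₀, PySem.Chars.split₀.go, hd, if_true, List.isEmpty_nil]

theorem split₀_run (ws w rest : List Char)
    (hws : ∀ c ∈ ws, PySem.Chars.isspace c = true) (hw : w ≠ [])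
    (hwn : ∀ c ∈ w, PySem.Chars.isspace c = false)
    (hrest : rest = [] ∨ ∃ d r', rest = d :: r' ∧ PySem.Chars.isspace d = true) :
    PySem.Chars.split₀ (ws ++ w ++ rest) = w :: PySem.Chars.split₀ rest := by
  rw [List.append_assoc]
  simp only [PySem.Chars.split₀]
  rw [split₀_go_space ws hws, split₀_go_word w hwn]
  have hwe : w.reverse.isEmpty = false := by
    simp [List.isEmpty_iff, hw]
  rcases hrest with rfl | ⟨d, r', rfl, hd⟩
  · simp only [PySem.Chars.split₀.go, List.append_nil, hwe, List.reverse_reverse]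
    simp [PySem.Chars.split₀, PySem.Chars.split₀.go]
  · simp only [List.append_nil, PySem.Chars.split₀.go, hd, if_true, hwe, List.reverse_reverse,
      Bool.false_eq_true, if_false]
    rw [split₀_go_acc]
    simp [split₀_cons_space d hd r', PySem.Chars.split₀]

theorem drop_head_false {p : Char → Bool} {l : List Char} {d : Char} {r : List Char}
    (h : List.dropWhile p l = d :: r) : p d = false := by
  have hne : List.dropWhile p l ≠ [] := by simp [h]
  have h2 := List.head_dropWhile_not p hne
  have h3 : (List.dropWhile p l).head hne = d := by
    simp [h]
  rwa [h3] at h2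

theorem run_decomp (l : List Char) :
    (∀ c ∈ l, PySem.Chars.isspace c = true) ∨
    ∃ ws w rest, l = ws ++ w ++ rest ∧ (∀ c ∈ ws, PySem.Chars.isspace c = true) ∧ w ≠ [] ∧
      (∀ c ∈ w, PySem.Chars.isspace c = false) ∧
      (rest = [] ∨ ∃ d r', rest = d :: r' ∧ PySem.Chars.isspace d = true) := by
  by_cases hall : ∀ c ∈ l, PySem.Chars.isspace c = true
  · exact Or.inl hall
  · right
    refine ⟨l.takeWhile PySem.Chars.isspace,
      (l.dropWhile PySem.Chars.isspace).takeWhile (fun c => !PySem.Chars.isspace c),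
      (l.dropWhile PySem.Chars.isspace).dropWhile (fun c => !PySem.Chars.isspace c),
      ?_, ?_, ?_, ?_, ?_⟩
    · rw [List.append_assoc, List.takeWhile_append_dropWhile, List.takeWhile_append_dropWhile]
    · intro c hc; exact List.mem_takeWhile_imp hc
    · have hl2ne : l.dropWhile PySem.Chars.isspace ≠ [] := by
        intro h
        apply hall
        intro c hc
        conv at hc => rw [← List.takeWhile_append_dropWhile (p := PySem.Chars.isspace) (l := l)]
        rw [h, List.append_nil] at hc
        exact List.mem_takeWhile_imp hc
      obtain ⟨c, t, hct⟩ := List.exists_cons_of_ne_nil hl2ne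
      have hc : PySem.Chars.isspace c = false := drop_head_false hct
      rw [hct]
      simp [List.takeWhile_cons, hc]
    · intro c hc
      have := List.mem_takeWhile_imp hc
      simpa using this
    · by_cases hr : (l.dropWhile PySem.Chars.isspace).dropWhile (fun c => !PySem.Chars.isspace c) = []
      · exact Or.inl hr
      · right
        obtain ⟨d, r', hdr⟩ := List.exists_cons_of_ne_nil hr
        refine ⟨d, r', hdr, ?_⟩
        have := drop_head_false hdr
        simpa using this

theorem find_run (ws w rest : List Char)
    (hws : ∀ c ∈ ws, PySem.Chars.isspace c = true) (hw : w ≠ [])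
    (hwn : ∀ c ∈ w, PySem.Chars.isspace c = false) :
    PySem.Chars.find (ws ++ w ++ rest) w = (ws.length : Int) := by
  have hinf : w <:+: (ws ++ w ++ rest) := ⟨ws, rest, by simp⟩
  have hpos : 0 ≤ PySem.Chars.find (ws ++ w ++ rest) w :=
    (PySem.Chars.find_nonneg_iff _ _).mpr hinf
  obtain ⟨hpre, hmin⟩ := PySem.Chars.find_spec hpos
  have hat : w <+: (ws ++ w ++ rest).drop ws.length := by
    rw [List.append_assoc, List.drop_left]
    exact List.prefix_append w rest
  have hnot : ∀ i, i < ws.length → ¬ w <+: (ws ++ w ++ rest).drop i := by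
    intro i hi hpref
    have hdrop : (ws ++ w ++ rest).drop i = ws.drop i ++ (w ++ rest) := by
      rw [List.append_assoc, List.drop_append_of_le_length (by omega)]
    obtain ⟨cw, w', rfl⟩ := List.exists_cons_of_ne_nil hw
    have hwsd : ws.drop i = ws[i] :: ws.drop (i + 1) := List.drop_eq_getElem_cons hi
    rw [hdrop, hwsd] at hpref
    rcases (List.cons_prefix_cons.mp hpref) with ⟨heq, -⟩
    have h1 := hws ws[i] (by simp [List.getElem_mem])
    have h2 := hwn cw (by simp)
    rw [← heq] at h1
    rw [h1] at h2
    exact absurd h2 (by simp)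
  have hle : (PySem.Chars.find (ws ++ w ++ rest) w).toNat ≤ ws.length := by
    by_contra hgt
    exact hmin ws.length (by omega) hat
  have hge : ws.length ≤ (PySem.Chars.find (ws ++ w ++ rest) w).toNat := by
    by_contra hlt
    exact hnot _ (by omega) hpre
  omega

theorem findFrom_run (cp : List Char) (pos : Nat) (hpos : pos ≤ cp.length)
    (ws w rest : List Char) (hl : cp.drop pos = ws ++ w ++ rest)
    (hws : ∀ c ∈ ws, PySem.Chars.isspace c = true) (hw : w ≠ [])
    (hwn : ∀ c ∈ w, PySem.Chars.isspace c = false) :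
    PySem.Chars.findFrom cp w (pos : Int) = ((pos + ws.length : Nat) : Int) := by
  rw [PySem.Chars.findFrom_natCast cp w pos hpos, hl, find_run ws w rest hws hw hwn]
  simp

-- the words of a suffix are the slices of B's spans of that suffix
theorem split₀_eq_spans (n : Nat) : ∀ (cp : List Char) (pos : Nat), (cp.drop pos).length ≤ n →
    PySem.Chars.split₀ (cp.drop pos)
      = (spansGo (cp.drop pos) pos none).map (fun se => (cp.drop se.1).take (se.2 - se.1)) := by
  induction n with
  | zero =>
    intro cp pos hn
    have : cp.drop pos = [] := List.eq_nil_of_length_eq_zero (by omega)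
    rw [this]
    simp [PySem.Chars.split₀, PySem.Chars.split₀.go, spansGo]
  | succ n ih =>
    intro cp pos hn
    rcases run_decomp (cp.drop pos) with hall | ⟨ws, w, rest, hl, hws, hw, hwn, hrest⟩
    · rw [split₀_all_space _ hall]
      have h2 : spansGo (cp.drop pos ++ []) pos none = [] := by
        rw [spansGo_space _ hall [] pos]; rfl
      rw [List.append_nil] at h2
      rw [h2]
      rfl
    · have hdw : cp.drop (pos + ws.length) = w ++ rest := by
        rw [← List.drop_drop, hl, List.append_assoc, List.drop_left]
      have hdr : cp.drop (pos + ws.length + w.length) = rest := by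
        rw [← List.drop_drop, hdw, List.drop_left]
      have hlen : rest.length ≤ n := by
        have h1 := congrArg List.length hl
        simp only [List.length_append] at h1
        have hw1 : 1 ≤ w.length := by
          cases w with
          | nil => exact absurd rfl hw
          | cons a b => simp
        omega
      rw [hl, split₀_run ws w rest hws hw hwn hrest, spansGo_run ws w rest hws hw hwn hrest pos]
      simp only [List.map_cons]
      have hextract : (cp.drop (pos + ws.length)).take (pos + ws.length + w.length - (pos + ws.length)) = w := by
        rw [hdw]
        have : pos + ws.length + w.length - (pos + ws.length) = w.length := by omega
        rw [this, List.take_left]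
      rw [hextract]
      have htail := ih cp (pos + ws.length + w.length) (by rw [hdr]; exact hlen)
      rw [hdr] at htail
      rw [← htail]

-- A's word loop = B's span lookup, on any suffix
theorem wordLoop_eq_spanFind (n : Nat) : ∀ (cp : List Char) (pos idx m : Nat),
    pos ≤ cp.length → (cp.drop pos).length ≤ n →
    wordLoopA cp (m : Int) (PySem.Chars.split₀ (cp.drop pos)) idx (pos : Int)
      = (spanFind m (spansGo (cp.drop pos) pos none) idx).map
          (fun x => ((cp.drop x.1.1).take (x.1.2 - x.1.1), x.2)) := by
  induction n with
  | zero =>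
    intro cp pos idx m hpos hn
    have : cp.drop pos = [] := List.eq_nil_of_length_eq_zero (by omega)
    rw [this]
    simp [PySem.Chars.split₀, PySem.Chars.split₀.go, spansGo, wordLoopA, spanFind]
  | succ n ih =>
    intro cp pos idx m hpos hn
    rcases run_decomp (cp.drop pos) with hall | ⟨ws, w, rest, hl, hws, hw, hwn, hrest⟩
    · rw [split₀_all_space _ hall]
      have h2 : spansGo (cp.drop pos ++ []) pos none = [] := by
        rw [spansGo_space _ hall [] pos]; rfl
      rw [List.append_nil] at h2
      rw [h2]
      rfl
    · have hdw : cp.drop (pos + ws.length) = w ++ rest := by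
        rw [← List.drop_drop, hl, List.append_assoc, List.drop_left]
      have hdr : cp.drop (pos + ws.length + w.length) = rest := by
        rw [← List.drop_drop, hdw, List.drop_left]
      have hw1 : 1 ≤ w.length := by
        cases w with
        | nil => exact absurd rfl hw
        | cons a b => simp
      have hlensum : (cp.drop pos).length = ws.length + w.length + rest.length := by
        rw [hl]; simp; omega
      have hdl : (cp.drop pos).length = cp.length - pos := by simp
      have hfind := findFrom_run cp pos hpos ws w rest hl hws hw hwn
      rw [hl, split₀_run ws w rest hws hw hwn hrest, spansGo_run ws w rest hws hw hwn hrest pos]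
      simp only [wordLoopA, hfind, spanFind]
      have hcond : ((((pos + ws.length : Nat) : Int) ≤ (m : Int) ∧ (m : Int) < ((pos + ws.length : Nat) : Int) + (w.length : Int)))
          ↔ (pos + ws.length ≤ m ∧ m < pos + ws.length + w.length) := by
        constructor <;> intro h <;> constructor <;> [exact_mod_cast h.1; exact_mod_cast h.2;
          exact_mod_cast h.1; exact_mod_cast h.2]
      by_cases hc : pos + ws.length ≤ m ∧ m < pos + ws.length + w.length
      · rw [if_pos (hcond.mpr hc), if_pos hc]
        simp only [Option.map_some]
        have hextract : (cp.drop (pos + ws.length)).take (pos + ws.length + w.length - (pos + ws.length)) = w := by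
          rw [hdw]
          have : pos + ws.length + w.length - (pos + ws.length) = w.length := by omega
          rw [this, List.take_left]
        rw [hextract]
      · rw [if_neg (fun h => hc (hcond.mp h)), if_neg hc]
        have hcast : ((pos + ws.length : Nat) : Int) + (w.length : Int) = ((pos + ws.length + w.length : Nat) : Int) := by
          push_cast; ring
        rw [hcast]
        have htail := ih cp (pos + ws.length + w.length) (idx + 1) m (by omega)
          (by rw [hdr]; omega)
        rw [hdr] at htail
        exact htail

theorem tail_eq (cp : List Char) (adj : Int) (h0 : 0 ≤ adj) :
    (match wordLoopA cp adj (PySem.Chars.split₀ cp) 0 0 with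
     | some (w, i) => some (String.ofList w, (i : Int))
     | none =>
       match (PySem.Chars.split₀ cp).getLast? with
       | some w => some (String.ofList w, ((PySem.Chars.split₀ cp).length : Int) - 1)
       | none => none)
    = (match spanFind adj.toNat (spansGo cp 0 none) 0 with
       | some (se, j) =>
         some (String.ofList (PySem.Chars.slice cp (some (se.1 : Int)) (some (se.2 : Int))), (j : Int))
       | none =>
         match (spansGo cp 0 none).getLast? with
         | none => none
         | some se =>
           some (String.ofList (PySem.Chars.slice cp (some (se.1 : Int)) (some (se.2 : Int))),
             ((spansGo cp 0 none).length : Int) - 1)) := by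
  have hm : ((adj.toNat : Nat) : Int) = adj := Int.toNat_of_nonneg h0
  have hW := wordLoop_eq_spanFind cp.length cp 0 0 adj.toNat (by omega) (by simp)
  have hS := split₀_eq_spans cp.length cp 0 (by simp)
  rw [List.drop_zero] at hW hS
  rw [Nat.cast_zero, hm] at hW
  rw [hW]
  have hslice : ∀ se : Nat × Nat,
      PySem.Chars.slice cp (some (se.1 : Int)) (some (se.2 : Int))
        = (cp.drop se.1).take (se.2 - se.1) := by
    intro se
    rw [PySem.Chars.slice_eq_listSlice, PySem.List.slice_natCast]
  cases hsf : spanFind adj.toNat (spansGo cp 0 none) 0 with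
  | some x =>
    simp only [Option.map_some, hslice x.1]
  | none =>
    simp only [Option.map_none]
    rw [hS, List.getLast?_map]
    cases hgl : (spansGo cp 0 none).getLast? with
    | none => rfl
    | some se =>
      simp only [Option.map_some, hslice se, List.length_map]

-- ===== VERDICT (by name: the statement is the Claim_ definition above) =====
theorem extract_word_at_marker_spec : Claim_equal_extract_word_at_marker := by
  intro command output _
  unfold Spec_extract_word_at_marker extract_word_at_marker extract_word_at_marker_alt
  dsimp only
  by_cases h1 : PySem.Chars.isIn ['^'] output.toList = false
  · simp only [h1, if_true]
  · have htrue : PySem.Chars.isIn ['^'] output.toList = true := by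
      revert h1; cases PySem.Chars.isIn ['^'] output.toList <;> simp
    rw [htrue]
    simp only [Bool.true_eq_false, if_false]
    have hml := markerLoop_eq (PySem.Chars.splitOn output.toList ['\n']) 0
    rw [Nat.cast_zero] at hml
    cases hB : markerLoopB (PySem.Chars.splitOn output.toList ['\n']) 0 with
    | none =>
      rw [hB] at hml
      simp only [Option.elim] at hml
      rw [hml]
      norm_num
    | some k =>
      rw [hB] at hml
      simp only [Option.elim] at hml
      rw [hml]
      cases k with
      | zero =>
        norm_num
      | succ k =>
        have hguard : ¬(((k + 1 : Nat) : Int) < 0 ∨ ((k + 1 : Nat) : Int) = 0) := by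
          push_cast; omega
        rw [if_neg hguard]
        have hidx : ((k + 1 : Nat) : Int) - 1 = ((k : Nat) : Int) := by push_cast; ring
        rw [hidx, PySem.List.pyGetD_natCast, PySem.List.pyGetD_natCast]
        dsimp only
        set lines := PySem.Chars.splitOn output.toList ['\n'] with hlines
        set commandLine := lines.getD k [] with hcl
        set markerPosition := PySem.Chars.find (lines.getD (k + 1) []) ['^'] with hmp
        set promptEnd := max (PySem.Chars.rfind commandLine ['#'])
          (PySem.Chars.rfind commandLine ['>']) with hpe
        have hpe1 : -1 ≤ promptEnd :=
          le_trans (neg_one_le_rfind commandLine ['#']) (le_max_left _ _)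
        by_cases hneg : promptEnd < 0
        · have hpem1 : promptEnd = -1 := by omega
          have hclslice : PySem.Chars.slice commandLine (some (promptEnd + 1)) none = commandLine := by
            rw [hpem1, show (-1 : Int) + 1 = 0 from by norm_num, PySem.Chars.slice_eq_listSlice,
              PySem.List.slice_zero_start, PySem.List.slice_none_none]
          rw [if_pos hneg]
          dsimp only
          rw [hclslice, hpem1]
          norm_num
          by_cases hrange : markerPosition < 0 ∨ (commandLine.length : Int) ≤ markerPosition
          · rw [if_pos hrange, if_pos hrange]
          · rw [if_neg hrange, if_neg hrange]
            push_neg at hrange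
            exact tail_eq commandLine markerPosition (by omega)
        · rw [if_neg hneg]
          dsimp only
          by_cases hrange : markerPosition - (promptEnd + 1) < 0 ∨
              ((PySem.Chars.slice commandLine (some (promptEnd + 1)) none).length : Int)
                ≤ markerPosition - (promptEnd + 1)
          · rw [if_pos hrange, if_pos hrange]
          · rw [if_neg hrange, if_neg hrange]
            push_neg at hrange
            exact tail_eq _ _ (by omega)
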